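-- pv_equiv track=rewrite | github.com/Zarathustra5/polytech | ai/genetic/genetic.py | getPsl
-- ===== SOURCE A (Python) =====
-- def getPsl(individual):
--     individual = [-1 if x == 0 else x for x in individual]
--     N = len(individual)
--     Rk = []
--     for k in range(-N + 1, N):
--         Rk.append(sum(individual[i] * individual[i - k] for i in range(N) if 0 <= i - k < N))
--     PSL = max(Rk[i] for i in range(len(Rk)) if i != N - 1)
--     return PSL
-- ===== SOURCE B (Python) =====
-- def getPsl(individual):
--     s = [-1 if x == 0 else x for x in individual]
--     n = len(s)
--     M = max(abs(v) for v in s)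
--     B = (n * M * M).bit_length() + 1
--     P = Q = RP = RQ = 0
--     for i, v in enumerate(s):
--         if v > 0:
--             P += v << (B * i)
--             RP += v << (B * (n - 1 - i))
--         else:
--             Q += (-v) << (B * i)
--             RQ += (-v) << (B * (n - 1 - i))
--     PP, PQ, QP, QQ = P * RP, P * RQ, Q * RP, Q * RQ
--     mask = (1 << B) - 1
--     return max(((PP >> (B * (n - 1 + k))) & mask)
--                - ((PQ >> (B * (n - 1 + k))) & mask)
--                - ((QP >> (B * (n - 1 + k))) & mask)
--                + ((QQ >> (B * (n - 1 + k))) & mask)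
--                for k in range(1, n))
-- ===== Notes on version B (the rewrite author's own statement) =====
-- stated objective: faster
-- what changed: B computes the exact autocorrelation by Kronecker substitution: it packs the positive and negative parts of the sequence into big integers with carry-free base-2^B digits, forms four big-integer products whose digits are exactly the convolution coefficients, and reads the off-zero correlations back with shifts and masks, instead of A's per-lag summation loops.
import Mathlib
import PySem

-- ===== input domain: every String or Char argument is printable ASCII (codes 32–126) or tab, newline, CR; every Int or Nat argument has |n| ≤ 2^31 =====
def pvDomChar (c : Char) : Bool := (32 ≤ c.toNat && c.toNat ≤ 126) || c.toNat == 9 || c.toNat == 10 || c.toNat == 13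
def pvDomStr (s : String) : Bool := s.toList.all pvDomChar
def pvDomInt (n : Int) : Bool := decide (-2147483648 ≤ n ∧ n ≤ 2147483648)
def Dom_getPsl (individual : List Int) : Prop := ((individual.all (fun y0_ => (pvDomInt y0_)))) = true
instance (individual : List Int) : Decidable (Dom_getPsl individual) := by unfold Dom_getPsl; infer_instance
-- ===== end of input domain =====

-- B computes the same peak-sidelobe value by Kronecker substitution: the positive and
-- negative parts of the sequence are packed into big naturals with carry-free base-2^B
-- digits, one multiplication per part-pair yields all convolution coefficients at once,
-- and the off-zero correlations are read back with shifts and masks (A sums per lag).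


-- ===== PORT A =====
-- sum(individual[i] * individual[i - k] for i in range(N) if 0 <= i - k < N)
def corrA (s : List Int) (N k : Int) : Int :=
  (((PySem.List.pyRange 0 N 1).filter (fun i => decide (0 ≤ i - k ∧ i - k < N))).map
    (fun i => PySem.List.pyGetD s i 0 * PySem.List.pyGetD s (i - k) 0)).sum

def getPsl (individual : List Int) : Int :=
  let s := individual.map (fun x => if x = 0 then -1 else x)
  let N : Int := s.length
  let Rk := (PySem.List.pyRange (-N + 1) N 1).foldl (fun acc k => acc ++ [corrA s N k]) []
  let vals := ((PySem.List.pyRange 0 (Rk.length : Int) 1).filter (fun i => decide (i ≠ N - 1))).map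
    (fun i => PySem.List.pyGetD Rk i 0)
  (PySem.List.max? vals (fun y => y)).getD 0   -- max() raises on an empty argument: excluded by Pre_

-- ===== PORT B =====
-- Kronecker substitution (Source B): the Python big ints P, Q, RP, RQ are nonnegative
-- throughout, so they are tracked as Nat; v << e is v.toNat <<< e (v > 0 there).
def getPsl_alt (individual : List Int) : Int :=
  let s := individual.map (fun x => if x = 0 then -1 else x)
  let n := s.length
  let M := (PySem.List.max? (s.map (fun v => |v|)) (fun y => y)).getD 0   -- max() raises on an empty argument: excluded by Pre_
  let Bb := PySem.Int.bitLength ((n : Int) * M * M) + 1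
  let st := (PySem.List.enumerate s 0).foldl
    (fun (st : Nat × Nat × Nat × Nat) (iv : Int × Int) =>
      if iv.2 > 0 then
        (st.1 + (iv.2.toNat <<< (Bb * iv.1.toNat)), st.2.1,
         st.2.2.1 + (iv.2.toNat <<< (Bb * (n - 1 - iv.1.toNat))), st.2.2.2)
      else
        (st.1, st.2.1 + ((-iv.2).toNat <<< (Bb * iv.1.toNat)),
         st.2.2.1, st.2.2.2 + ((-iv.2).toNat <<< (Bb * (n - 1 - iv.1.toNat)))))
    (0, 0, 0, 0)
  let PP := st.1 * st.2.2.1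
  let PQ := st.1 * st.2.2.2
  let QP := st.2.1 * st.2.2.1
  let QQ := st.2.1 * st.2.2.2
  let mask := (1 <<< Bb) - 1
  (PySem.List.max? ((PySem.List.pyRange 1 (n : Int) 1).map (fun k =>
      (((PP >>> (Bb * (n - 1 + k.toNat))) &&& mask : Nat) : Int)
        - (((PQ >>> (Bb * (n - 1 + k.toNat))) &&& mask : Nat) : Int)
        - (((QP >>> (Bb * (n - 1 + k.toNat))) &&& mask : Nat) : Int)
        + (((QQ >>> (Bb * (n - 1 + k.toNat))) &&& mask : Nat) : Int)))
    (fun y => y)).getD 0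

-- ===== PRECONDITION & SPEC =====
-- Pre_ excludes lists of length < 2: there Python's max() in both A and B raises ValueError (empty argument).
def Pre_getPsl (individual : List Int) : Prop := 2 ≤ individual.length
instance (individual : List Int) : Decidable (Pre_getPsl individual) := by unfold Pre_getPsl; infer_instance
def pvWitness_getPsl : List Int := [1, 0, 1]

def Spec_getPsl (individual : List Int) (out : Int) : Prop := out = getPsl_alt individual
instance (individual : List Int) (out : Int) : Decidable (Spec_getPsl individual out) := by unfold Spec_getPsl; infer_instance

-- ===== CLAIM (what is proved, stated in full; the proofs are below) =====
def Claim_equal_getPsl : Prop := ∀ (individual : List Int), Dom_getPsl individual → Pre_getPsl individual → Spec_getPsl individual (getPsl individual)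

-- ===== LEMMAS AND PROOFS =====

-- the positive-shift one-sided autocorrelation both proofs meet at:
-- sum(s[i] * s[i + k] for i in range(n - k))
def corrB (s : List Int) (n k : Int) : Int :=
  ((PySem.List.pyRange 0 (n - k) 1).map
    (fun i => PySem.List.pyGetD s i 0 * PySem.List.pyGetD s (i + k) 0)).sum

-- ---- A-side: A's 2N-1 guarded lag sums collapse to the positive-lag maxima ----

-- filter for nonnegative shift k keeps exactly [k, N)
lemma filterA_pos (N k : Int) (hk : 0 ≤ k) :
    (PySem.List.pyRange 0 N 1).filter (fun i => decide (0 ≤ i - k ∧ i - k < N))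
      = PySem.List.pyRange k N 1 := by
  by_cases h : k ≤ N
  · rw [PySem.List.pyRange_one_append 0 k N hk h, List.filter_append]
    have h1 : (PySem.List.pyRange 0 k 1).filter (fun i => decide (0 ≤ i - k ∧ i - k < N)) = [] := by
      apply List.filter_eq_nil_iff.mpr
      intro i hi
      have := PySem.List.mem_pyRange_one.mp hi
      simp only [decide_eq_true_eq]
      omega
    have h2 : (PySem.List.pyRange k N 1).filter (fun i => decide (0 ≤ i - k ∧ i - k < N))
        = PySem.List.pyRange k N 1 := by
      apply List.filter_eq_self.mpr
      intro i hi
      have := PySem.List.mem_pyRange_one.mp hi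
      simp only [decide_eq_true_eq]
      omega
    rw [h1, h2, List.nil_append]
  · rw [PySem.List.pyRange_one_eq_nil (by omega : N ≤ k)]
    apply List.filter_eq_nil_iff.mpr
    intro i hi
    have := PySem.List.mem_pyRange_one.mp hi
    simp only [decide_eq_true_eq]
    omega

-- filter for negative shift -k keeps exactly [0, N - k)
lemma filterA_neg (N k : Int) (hk : 0 < k) :
    (PySem.List.pyRange 0 N 1).filter (fun i => decide (0 ≤ i - (-k) ∧ i - (-k) < N))
      = PySem.List.pyRange 0 (N - k) 1 := by
  by_cases h : 0 ≤ N - k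
  · rw [PySem.List.pyRange_one_append 0 (N - k) N h (by omega), List.filter_append]
    have h1 : (PySem.List.pyRange 0 (N - k) 1).filter (fun i => decide (0 ≤ i - (-k) ∧ i - (-k) < N))
        = PySem.List.pyRange 0 (N - k) 1 := by
      apply List.filter_eq_self.mpr
      intro i hi
      have := PySem.List.mem_pyRange_one.mp hi
      simp only [decide_eq_true_eq]
      omega
    have h2 : (PySem.List.pyRange (N - k) N 1).filter (fun i => decide (0 ≤ i - (-k) ∧ i - (-k) < N)) = [] := by
      apply List.filter_eq_nil_iff.mpr
      intro i hi
      have := PySem.List.mem_pyRange_one.mp hi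
      simp only [decide_eq_true_eq]
      omega
    rw [h1, h2, List.append_nil]
  · rw [PySem.List.pyRange_one_eq_nil (by omega : N - k ≤ 0)]
    apply List.filter_eq_nil_iff.mpr
    intro i hi
    have := PySem.List.mem_pyRange_one.mp hi
    simp only [decide_eq_true_eq]
    omega

lemma corrA_nonneg (s : List Int) (N k : Int) (hk : 0 ≤ k) :
    corrA s N k = corrB s N k := by
  unfold corrA corrB
  rw [filterA_pos N k hk]
  rw [PySem.List.pyRange_one k N, PySem.List.pyRange_one 0 (N - k), List.map_map, List.map_map]
  have hr : N - k - 0 = N - k := by omega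
  rw [hr]
  congr 1
  apply List.map_congr_left
  intro j _
  simp only [Function.comp_apply]
  have e1 : k + (j : Int) - k = (j : Int) := by omega
  have e2 : (0 : Int) + (j : Int) = (j : Int) := by omega
  rw [e1, e2, mul_comm]
  congr 2
  omega

lemma corrA_neg (s : List Int) (N k : Int) (hk : 0 < k) :
    corrA s N (-k) = corrB s N k := by
  unfold corrA corrB
  rw [filterA_neg N k hk]
  congr 1
  apply List.map_congr_left
  intro i _
  congr 2
  omega

lemma foldl_max_max (l : List Int) (a : Int) : ∀ b, l.foldl max (max a b) = max a (l.foldl max b) := by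
  induction l with
  | nil => intro b; simp [List.foldl]
  | cons x t ih =>
    intro b
    simp only [List.foldl]
    rw [max_assoc, ih]

lemma foldl_max_cons' (x : Int) (t : List Int) (a : Int) :
    (x :: t).foldl max a = max a (t.foldl max x) := by
  simp only [List.foldl]
  exact foldl_max_max t a x

lemma foldl_max_reverse (l : List Int) : ∀ a, l.reverse.foldl max a = l.foldl max a := by
  induction l with
  | nil => intro a; rfl
  | cons x t ih =>
    intro a
    rw [List.reverse_cons, List.foldl_append, ih]
    simp only [List.foldl]
    rw [max_comm a x, foldl_max_max t x a, max_comm]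

lemma max_rev_append (P : List Int) (h : P ≠ []) :
    (PySem.List.max? (P.reverse ++ P) (fun y => y)).getD 0
      = (PySem.List.max? P (fun y => y)).getD 0 := by
  obtain ⟨p, t, rfl⟩ := List.exists_cons_of_ne_nil h
  obtain ⟨q, v, hqv⟩ := List.exists_cons_of_ne_nil (l := (p :: t).reverse) (by simp)
  rw [hqv, List.cons_append, PySem.List.max?_id_cons, PySem.List.max?_id_cons]
  simp only [Option.getD_some]
  rw [List.foldl_append]
  set mP := t.foldl max p with hmP
  have hc : v.foldl max q = mP := by
    have key : ∀ a : Int, max a (v.foldl max q) = max a mP := by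
      intro a
      rw [← foldl_max_cons' q v a, ← hqv, foldl_max_reverse, foldl_max_cons' p t a, ← hmP]
    have h1 := key (v.foldl max q)
    have h2 := key mP
    simp only [max_self] at h1 h2
    omega
  rw [hc, foldl_max_cons' p t mP, ← hmP, max_self]

lemma pyGetD_map_range (g : Int → Int) (A B i : Int) (h0 : 0 ≤ i) (h1 : i < B - A) :
    PySem.List.pyGetD ((PySem.List.pyRange A B 1).map g) i 0 = g (A + i) := by
  have hlen : (((PySem.List.pyRange A B 1).map g).length : Int) = B - A := by
    rw [List.length_map, PySem.List.length_pyRange_one]; omega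
  rw [PySem.List.pyGetD_eq_getElem _ _ h0 (by omega)]
  rw [List.getElem_map, PySem.List.getElem_pyRange_one]
  congr 1
  omega

-- A's value is the max of the N-1 positive-lag one-sided sums
lemma getPsl_eq_corrmax (individual : List Int) (hPre : 2 ≤ individual.length) :
    getPsl individual =
      (PySem.List.max? ((PySem.List.pyRange 1 ((individual.map (fun x : Int => if x = 0 then -1 else x)).length : Int) 1).map
        (fun k => corrB (individual.map (fun x : Int => if x = 0 then -1 else x))
          ((individual.map (fun x : Int => if x = 0 then -1 else x)).length : Int) k)) (fun y => y)).getD 0 := by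
  simp only [getPsl]
  set s := individual.map (fun x : Int => if x = 0 then -1 else x) with hs
  set N : Int := (s.length : Int) with hN
  have hN2 : 2 ≤ N := by
    rw [hN, hs]; simp only [List.length_map]; omega
  set g := corrA s N with hg
  rw [PySem.List.foldl_append_singleton_eq_map g _ []]
  rw [List.nil_append]
  set Rk := (PySem.List.pyRange (-N + 1) N 1).map g with hRk
  have hlen : ((Rk.length : Nat) : Int) = 2 * N - 1 := by
    rw [hRk, List.length_map, PySem.List.length_pyRange_one]; omega
  rw [hlen]
  have hsplit : PySem.List.pyRange 0 (2 * N - 1) 1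
      = PySem.List.pyRange 0 (N - 1) 1 ++ (PySem.List.pyRange (N - 1) N 1 ++ PySem.List.pyRange N (2 * N - 1) 1) := by
    rw [← PySem.List.pyRange_one_append (N - 1) N (2 * N - 1) (by omega) (by omega)]
    rw [← PySem.List.pyRange_one_append 0 (N - 1) (2 * N - 1) (by omega) (by omega)]
  rw [hsplit, List.filter_append, List.filter_append]
  have hfL : (PySem.List.pyRange 0 (N - 1) 1).filter (fun i => decide (i ≠ N - 1))
      = PySem.List.pyRange 0 (N - 1) 1 := by
    apply List.filter_eq_self.mpr
    intro i hi
    have := PySem.List.mem_pyRange_one.mp hi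
    simp only [decide_eq_true_eq]
    omega
  have hmid : (PySem.List.pyRange (N - 1) N 1).filter (fun i => decide (i ≠ N - 1)) = [] := by
    apply List.filter_eq_nil_iff.mpr
    intro i hi
    have := PySem.List.mem_pyRange_one.mp hi
    simp only [decide_eq_true_eq]
    omega
  have hfR : (PySem.List.pyRange N (2 * N - 1) 1).filter (fun i => decide (i ≠ N - 1))
      = PySem.List.pyRange N (2 * N - 1) 1 := by
    apply List.filter_eq_self.mpr
    intro i hi
    have := PySem.List.mem_pyRange_one.mp hi
    simp only [decide_eq_true_eq]
    omega
  rw [hfL, hmid, hfR, List.nil_append, List.map_append]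
  set P := (PySem.List.pyRange 1 N 1).map (fun k => corrB s N k) with hP
  have hgetD : ∀ i : Int, 0 ≤ i → i < 2 * N - 1 → PySem.List.pyGetD Rk i 0 = g (-N + 1 + i) := by
    intro i h0 h1
    rw [hRk]
    exact pyGetD_map_range g (-N + 1) N i h0 (by omega)
  have hL : (PySem.List.pyRange 0 (N - 1) 1).map (fun i => PySem.List.pyGetD Rk i 0) = P.reverse := by
    rw [List.map_congr_left (g := fun i => g (-N + 1 + i)) (fun i hi => by
      have := PySem.List.mem_pyRange_one.mp hi
      exact hgetD i (by omega) (by omega))]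
    rw [hP, ← List.map_reverse]
    have hrev : (PySem.List.pyRange 1 N 1).reverse = PySem.List.pyRange (N - 1) 0 (-1) := by
      rw [PySem.List.pyRange_neg_one_eq_reverse (N - 1) 0]
      congr 1
      norm_num
    rw [hrev, PySem.List.pyRange_neg_one (N - 1) 0, PySem.List.pyRange_one 0 (N - 1),
      List.map_map, List.map_map]
    have he : N - 1 - 0 = N - 1 := by omega
    rw [he]
    apply List.map_congr_left
    intro j hj
    have hjlt : (j : Int) < N - 1 := by
      have := List.mem_range.mp hj
      omega
    simp only [Function.comp_apply]
    have e1 : -N + 1 + (0 + (j : Int)) = -(N - 1 - (j : Int)) := by omega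
    rw [e1, hg, corrA_neg s N (N - 1 - (j : Int)) (by omega)]
  have hR : (PySem.List.pyRange N (2 * N - 1) 1).map (fun i => PySem.List.pyGetD Rk i 0) = P := by
    rw [List.map_congr_left (g := fun i => g (-N + 1 + i)) (fun i hi => by
      have := PySem.List.mem_pyRange_one.mp hi
      exact hgetD i (by omega) (by omega))]
    rw [hP, PySem.List.pyRange_one N (2 * N - 1), PySem.List.pyRange_one 1 N,
      List.map_map, List.map_map]
    have he : 2 * N - 1 - N = N - 1 := by omega
    rw [he]
    apply List.map_congr_left
    intro j hj
    simp only [Function.comp_apply]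
    have e1 : -N + 1 + (N + (j : Int)) = 1 + (j : Int) := by omega
    rw [e1, hg, corrA_nonneg s N (1 + (j : Int)) (by omega)]
  rw [hL, hR]
  apply max_rev_append
  rw [hP]
  intro hnil
  have hlen2 := congrArg List.length hnil
  rw [List.length_map, PySem.List.length_pyRange_one] at hlen2
  simp only [List.length_nil] at hlen2
  have hle := Int.toNat_eq_zero.mp hlen2
  omega

-- ---- B-side: carry-free positional encodings and convolution ----

def pospart (v : Int) : Nat := if v > 0 then v.toNat else 0
def negpart (v : Int) : Nat := if v > 0 then 0 else (-v).toNat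

-- elementwise sum of two digit lists, padding the shorter with zeros
def padAdd : List Nat → List Nat → List Nat
  | [], ys => ys
  | xs, [] => xs
  | x :: xs, y :: ys => (x + y) :: padAdd xs ys

-- schoolbook convolution of digit lists
def conv : List Nat → List Nat → List Nat
  | [], _ => []
  | a :: l1, l2 => padAdd (l2.map (a * ·)) (0 :: conv l1 l2)

lemma ofDigits_padAdd (b : Nat) : ∀ (x y : List Nat),
    Nat.ofDigits b (padAdd x y) = Nat.ofDigits b x + Nat.ofDigits b y := by
  intro x
  induction x with
  | nil => intro y; simp [padAdd]
  | cons a t ih =>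
    intro y
    cases y with
    | nil => simp [padAdd]
    | cons c u =>
      simp only [padAdd, Nat.ofDigits_cons, ih]
      ring

lemma ofDigits_scale (b a : Nat) : ∀ (l : List Nat),
    Nat.ofDigits b (l.map (a * ·)) = a * Nat.ofDigits b l := by
  intro l
  induction l with
  | nil => simp
  | cons c u ih =>
    simp only [List.map_cons, Nat.ofDigits_cons, ih]
    ring

lemma ofDigits_conv (b : Nat) : ∀ (l1 l2 : List Nat),
    Nat.ofDigits b (conv l1 l2) = Nat.ofDigits b l1 * Nat.ofDigits b l2 := by
  intro l1
  induction l1 with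
  | nil => intro l2; simp [conv]
  | cons a t ih =>
    intro l2
    simp only [conv, ofDigits_padAdd, ofDigits_scale, Nat.ofDigits_cons, ih]
    ring

lemma getD_padAdd : ∀ (x y : List Nat) (m : Nat),
    (padAdd x y).getD m 0 = x.getD m 0 + y.getD m 0 := by
  intro x
  induction x with
  | nil => intro y m; simp [padAdd]
  | cons a t ih =>
    intro y m
    cases y with
    | nil => simp [padAdd]
    | cons c u =>
      cases m with
      | zero => simp [padAdd]
      | succ m =>
        simp only [padAdd, List.getD_cons_succ]
        exact ih u m

lemma getD_scale (a : Nat) (l : List Nat) (m : Nat) :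
    (l.map (a * ·)).getD m 0 = a * l.getD m 0 := by
  rcases lt_or_ge m l.length with h | h
  · simp [List.getD, List.getElem?_map, List.getElem?_eq_getElem h]
  · simp [List.getD, List.getElem?_eq_none_iff.mpr h]

lemma getD_conv : ∀ (l1 l2 : List Nat) (m : Nat),
    (conv l1 l2).getD m 0 = ∑ i ∈ Finset.range (m + 1), l1.getD i 0 * l2.getD (m - i) 0 := by
  intro l1
  induction l1 with
  | nil =>
    intro l2 m
    simp [conv]
  | cons a t ih =>
    intro l2 m
    simp only [conv, getD_padAdd, getD_scale]
    cases m with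
    | zero => simp
    | succ m =>
      rw [Finset.sum_range_succ' (fun i => (a :: t).getD i 0 * l2.getD (m + 1 - i) 0) (m + 1)]
      simp only [List.getD_cons_succ, List.getD_cons_zero, ih]
      have h2 : ∀ i, m + 1 - (i + 1) = m - i := by omega
      simp only [h2, Nat.sub_zero]
      ring

lemma mem_padAdd_le {A C : Nat} : ∀ (x y : List Nat), (∀ u ∈ x, u ≤ A) → (∀ u ∈ y, u ≤ C) →
    ∀ z ∈ padAdd x y, z ≤ A + C := by
  intro x
  induction x with
  | nil =>
    intro y _ hy z hz
    simp only [padAdd] at hz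
    exact le_trans (hy z hz) (by omega)
  | cons a t ih =>
    intro y hx hy z hz
    cases y with
    | nil =>
      simp only [padAdd] at hz
      exact le_trans (hx z hz) (by omega)
    | cons c u =>
      simp only [padAdd, List.mem_cons] at hz
      rcases hz with rfl | hz
      · have := hx a (by simp)
        have := hy c (by simp)
        omega
      · exact ih u (fun v hv => hx v (by simp [hv])) (fun v hv => hy v (by simp [hv])) z hz

lemma mem_conv_le {M1 M2 : Nat} : ∀ (l1 l2 : List Nat), (∀ u ∈ l1, u ≤ M1) → (∀ u ∈ l2, u ≤ M2) →
    ∀ z ∈ conv l1 l2, z ≤ l1.length * (M1 * M2) := by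
  intro l1
  induction l1 with
  | nil => intro l2 _ _ z hz; simp [conv] at hz
  | cons a t ih =>
    intro l2 h1 h2 z hz
    simp only [conv] at hz
    have hs : ∀ u ∈ l2.map (a * ·), u ≤ M1 * M2 := by
      intro u hu
      obtain ⟨w, hw, rfl⟩ := List.mem_map.mp hu
      exact Nat.mul_le_mul (h1 a (by simp)) (h2 w hw)
    have hc : ∀ u ∈ (0 :: conv t l2), u ≤ t.length * (M1 * M2) := by
      intro u hu
      rcases List.mem_cons.mp hu with rfl | hu
      · omega
      · exact ih l2 (fun v hv => h1 v (by simp [hv])) h2 u hu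
    have := mem_padAdd_le _ _ hs hc z hz
    simp only [List.length_cons]
    calc z ≤ M1 * M2 + t.length * (M1 * M2) := this
    _ = (t.length + 1) * (M1 * M2) := by ring

-- positional digit extraction: digits below the base are read back by div/mod
lemma ofDigits_extract (b : Nat) : ∀ (ds : List Nat), (∀ d ∈ ds, d < b) →
    ∀ m, Nat.ofDigits b ds / b ^ m % b = ds.getD m 0 := by
  intro ds
  induction ds with
  | nil => intro _ m; simp
  | cons d L ih =>
    intro hlt m
    have hb : 0 < b := lt_of_le_of_lt (Nat.zero_le d) (hlt d (by simp))
    have hofd : Nat.ofDigits b (d :: L) = d + b * Nat.ofDigits b L := by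
      rw [Nat.ofDigits_cons]
    cases m with
    | zero =>
      simp only [pow_zero, Nat.div_one, hofd, List.getD_cons_zero]
      rw [Nat.add_mul_mod_self_left]
      exact Nat.mod_eq_of_lt (hlt d (by simp))
    | succ m =>
      have hdiv : (d + b * Nat.ofDigits b L) / b = Nat.ofDigits b L := by
        rw [Nat.add_mul_div_left d _ hb, Nat.div_eq_of_lt (hlt d (by simp))]
        omega
      rw [hofd, pow_succ', ← Nat.div_div_eq_div_mul, hdiv, List.getD_cons_succ]
      exact ih (fun v hv => hlt v (by simp [hv])) m

-- ---- the accumulation loop computes the four positional encodings ----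

lemma step_split (Bb n : Nat) (st : Nat × Nat × Nat × Nat) (iv : Int × Int) :
    (if iv.2 > 0 then
        (st.1 + (iv.2.toNat <<< (Bb * iv.1.toNat)), st.2.1,
         st.2.2.1 + (iv.2.toNat <<< (Bb * (n - 1 - iv.1.toNat))), st.2.2.2)
      else
        (st.1, st.2.1 + ((-iv.2).toNat <<< (Bb * iv.1.toNat)),
         st.2.2.1, st.2.2.2 + ((-iv.2).toNat <<< (Bb * (n - 1 - iv.1.toNat)))))
    = (st.1 + pospart iv.2 * 2 ^ (Bb * iv.1.toNat),
       st.2.1 + negpart iv.2 * 2 ^ (Bb * iv.1.toNat),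
       st.2.2.1 + pospart iv.2 * 2 ^ (Bb * (n - 1 - iv.1.toNat)),
       st.2.2.2 + negpart iv.2 * 2 ^ (Bb * (n - 1 - iv.1.toNat))) := by
  by_cases h : iv.2 > 0 <;> simp [h, pospart, negpart, Nat.shiftLeft_eq]

lemma foldl_quad (f1 f2 f3 f4 : Int × Int → Nat) :
    ∀ (l : List (Int × Int)) (a b c d : Nat),
    l.foldl (fun st iv => (st.1 + f1 iv, st.2.1 + f2 iv, st.2.2.1 + f3 iv, st.2.2.2 + f4 iv))
        (a, b, c, d)
      = (a + (l.map f1).sum, b + (l.map f2).sum, c + (l.map f3).sum, d + (l.map f4).sum) := by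
  intro l
  induction l with
  | nil => intro a b c d; simp
  | cons x t ih =>
    intro a b c d
    simp only [List.foldl_cons, List.map_cons, List.sum_cons, ih, Prod.mk.injEq]
    omega

lemma sum_enum_pow (Bb : Nat) (f : Int → Nat) :
    ∀ (l : List Int) (j : Nat),
    ((PySem.List.enumerate l (j : Int)).map (fun iv => f iv.2 * 2 ^ (Bb * iv.1.toNat))).sum
      = 2 ^ (Bb * j) * Nat.ofDigits (2 ^ Bb) (l.map f) := by
  intro l
  induction l with
  | nil => intro j; simp [PySem.List.enumerate_nil]
  | cons x t ih =>
    intro j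
    rw [PySem.List.enumerate_cons]
    have hj1 : ((j : Int) + 1) = ((j + 1 : Nat) : Int) := by push_cast; ring
    rw [hj1]
    simp only [List.map_cons, List.sum_cons, ih (j + 1), Int.toNat_natCast,
      List.map_cons, Nat.ofDigits_cons]
    have : Bb * (j + 1) = Bb * j + Bb := by ring
    rw [this, pow_add]
    ring

lemma sum_enum_pow_rev (Bb m : Nat) (f : Int → Nat) :
    ∀ (l : List Int) (j : Nat), l.length + j = m + 1 →
    ((PySem.List.enumerate l (j : Int)).map (fun iv => f iv.2 * 2 ^ (Bb * (m - iv.1.toNat)))).sum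
      = Nat.ofDigits (2 ^ Bb) ((l.map f).reverse) := by
  intro l
  induction l with
  | nil => intro j _; simp [PySem.List.enumerate_nil]
  | cons x t ih =>
    intro j hlen
    rw [PySem.List.enumerate_cons]
    have hj1 : ((j : Int) + 1) = ((j + 1 : Nat) : Int) := by push_cast; ring
    rw [hj1]
    simp only [List.map_cons, List.sum_cons, Int.toNat_natCast]
    rw [ih (j + 1) (by simp at hlen ⊢; omega)]
    have hmj : m - j = t.length := by simp at hlen; omega
    rw [List.reverse_cons, Nat.ofDigits_append]
    have h1 : Nat.ofDigits (2 ^ Bb) [f x] = f x := by simp [Nat.ofDigits]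
    rw [h1, List.length_reverse, List.length_map, hmj, ← pow_mul]
    ring

-- ---- signed recombination of the four digit planes ----

lemma getD_map_basic (f : Int → Nat) (s : List Int) (i : Nat) (h : i < s.length) :
    (s.map f).getD i 0 = f s[i] := by
  simp [List.getD, List.getElem?_map, List.getElem?_eq_getElem h]

lemma part_cancel (s : List Int) (i : Nat) :
    (((s.map pospart).getD i 0 : Nat) : Int) - (((s.map negpart).getD i 0 : Nat) : Int)
      = s.getD i 0 := by
  rcases lt_or_ge i s.length with h | h
  · rw [getD_map_basic _ _ _ h, getD_map_basic _ _ _ h,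
      List.getD_eq_getElem s 0 h]
    unfold pospart negpart
    by_cases hv : s[i] > 0 <;> simp [hv] <;> omega
  · rw [List.getD_eq_default _ _ (by simpa using h), List.getD_eq_default _ _ (by simpa using h),
      List.getD_eq_default _ _ h]
    simp

lemma getD_reverse (l : List Int) (i : Nat) (h : i < l.length) :
    l.reverse.getD i 0 = l.getD (l.length - 1 - i) 0 := by
  rw [List.getD_eq_getElem _ 0 (by simpa using h), List.getD_eq_getElem _ 0 (by omega),
    List.getElem_reverse]

lemma list_range_sum (f : Nat → Int) (t : Nat) :
    ((List.range t).map f).sum = ∑ i ∈ Finset.range t, f i := rfl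

-- the center-shifted convolution digit is the one-sided lag-k autocorrelation
lemma signed_digit (s : List Int) (k n : Nat) (hn : n = s.length) (h1 : 1 ≤ k) (h2 : k < n) :
    ∑ i ∈ Finset.range (n - 1 + k + 1), s.getD i 0 * s.reverse.getD (n - 1 + k - i) 0
      = corrB s (n : Int) (k : Int) := by
  have hr : n - 1 + k + 1 = k + n := by omega
  rw [hr, Finset.sum_range_add]
  have hz1 : ∑ i ∈ Finset.range k, s.getD i 0 * s.reverse.getD (n - 1 + k - i) 0 = 0 := by
    apply Finset.sum_eq_zero
    intro i hi
    have hik := Finset.mem_range.mp hi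
    rw [List.getD_eq_default s.reverse _ (by rw [List.length_reverse]; omega)]
    ring
  rw [hz1, zero_add]
  have hmid : ∑ i ∈ Finset.range n, s.getD (k + i) 0 * s.reverse.getD (n - 1 + k - (k + i)) 0
      = (∑ i ∈ Finset.range (n - k), s.getD (k + i) 0 * s.reverse.getD (n - 1 + k - (k + i)) 0)
        + ∑ i ∈ Finset.range k, s.getD (k + (n - k + i)) 0 * s.reverse.getD (n - 1 + k - (k + (n - k + i))) 0 := by
    have h := Finset.sum_range_add
      (fun i => s.getD (k + i) 0 * s.reverse.getD (n - 1 + k - (k + i)) 0) (n - k) k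
    rw [show n - k + k = n by omega] at h
    exact h
  rw [hmid]
  have hz2 : ∑ i ∈ Finset.range k, s.getD (k + (n - k + i)) 0 * s.reverse.getD (n - 1 + k - (k + (n - k + i))) 0 = 0 := by
    apply Finset.sum_eq_zero
    intro i hi
    rw [List.getD_eq_default s _ (by omega)]
    ring
  rw [hz2, add_zero]
  unfold corrB
  rw [PySem.List.pyRange_one 0 ((n : Int) - k)]
  have htn : (((n : Int) - k) - 0).toNat = n - k := by omega
  rw [htn, List.map_map, list_range_sum]
  apply Finset.sum_congr rfl
  intro j hj
  have hjlt := Finset.mem_range.mp hj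
  simp only [Function.comp_apply]
  have e0 : (0 : Int) + (j : Int) = ((j : Nat) : Int) := by ring
  rw [e0]
  have e1 : ((j : Nat) : Int) + (k : Int) = (((j + k : Nat)) : Int) := by push_cast; ring
  rw [e1, PySem.List.pyGetD_natCast, PySem.List.pyGetD_natCast]
  have e2 : n - 1 + k - (k + j) = n - 1 - j := by omega
  rw [e2, getD_reverse s (n - 1 - j) (by omega)]
  have e3 : s.length - 1 - (n - 1 - j) = j := by omega
  rw [e3]
  have e4 : j + k = k + j := by omega
  rw [e4, mul_comm]

-- B's value: each masked shift reads one exact convolution digit, which recombines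
-- into the one-sided lag-k autocorrelation
lemma getPsl_alt_eq_corrmax (individual : List Int) (hPre : 2 ≤ individual.length) :
    getPsl_alt individual =
      (PySem.List.max? ((PySem.List.pyRange 1 ((individual.map (fun x : Int => if x = 0 then -1 else x)).length : Int) 1).map
        (fun k => corrB (individual.map (fun x : Int => if x = 0 then -1 else x))
          ((individual.map (fun x : Int => if x = 0 then -1 else x)).length : Int) k)) (fun y => y)).getD 0 := by
  simp only [getPsl_alt]
  set s := individual.map (fun x : Int => if x = 0 then -1 else x) with hs
  set n := s.length with hn
  have hn2 : 2 ≤ n := by rw [hn, hs]; simp only [List.length_map]; omega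
  -- the maximum absolute value M
  obtain ⟨M, hMeq⟩ : ∃ y, PySem.List.max? (s.map (fun v => |v|)) (fun y => y) = some y := by
    cases h : PySem.List.max? (s.map (fun v => |v|)) (fun y => y) with
    | none =>
      exfalso
      have := (PySem.List.max?_eq_none_iff _ _).mp h
      have := congrArg List.length this
      simp only [List.length_map, List.length_nil] at this
      omega
    | some y => exact ⟨y, rfl⟩
  rw [hMeq]
  simp only [Option.getD_some]
  have hM0 : 0 ≤ M := by
    have hm := PySem.List.max?_mem hMeq
    obtain ⟨v, _, rfl⟩ := List.mem_map.mp hm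
    exact abs_nonneg v
  have hMb : ∀ v ∈ s, |v| ≤ M := by
    intro v hv
    exact PySem.List.max?_isMax hMeq |v| (List.mem_map.mpr ⟨v, hv, rfl⟩)
  set Bb := PySem.Int.bitLength ((n : Int) * M * M) + 1 with hBb
  set Mn := M.toNat with hMn
  set p := s.map pospart with hp
  set q := s.map negpart with hq
  -- element bounds
  have hpb : ∀ u ∈ p, u ≤ Mn := by
    intro u hu
    obtain ⟨v, hv, rfl⟩ := List.mem_map.mp hu
    have := abs_le.mp (hMb v hv)
    unfold pospart
    split_ifs <;> omega
  have hqb : ∀ u ∈ q, u ≤ Mn := by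
    intro u hu
    obtain ⟨v, hv, rfl⟩ := List.mem_map.mp hu
    have := abs_le.mp (hMb v hv)
    unfold negpart
    split_ifs <;> omega
  have hprb : ∀ u ∈ p.reverse, u ≤ Mn := fun u hu => hpb u (List.mem_reverse.mp hu)
  have hqrb : ∀ u ∈ q.reverse, u ≤ Mn := fun u hu => hqb u (List.mem_reverse.mp hu)
  -- the base dominates every convolution digit
  have hbound : n * (Mn * Mn) < 2 ^ Bb := by
    have hMt : ((Mn : Nat) : Int) = M := Int.toNat_of_nonneg hM0
    have hX : (n : Int) * M * M = ((n * Mn * Mn : Nat) : Int) := by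
      push_cast [hMt]
      ring
    have h1 := PySem.Int.lt_two_pow_bitLength ((n : Int) * M * M)
    rw [hX, Int.natAbs_natCast] at h1
    rw [hBb, hX, pow_succ]
    calc n * (Mn * Mn) = n * Mn * Mn := by ring
    _ < 2 ^ PySem.Int.bitLength ((n * Mn * Mn : Nat) : Int) := h1
    _ ≤ 2 ^ PySem.Int.bitLength ((n * Mn * Mn : Nat) : Int) * 2 :=
        Nat.le_mul_of_pos_right _ (by norm_num)
  -- the accumulation loop yields the four positional encodings
  have hfold : (PySem.List.enumerate s 0).foldl
      (fun (st : Nat × Nat × Nat × Nat) (iv : Int × Int) =>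
        if iv.2 > 0 then
          (st.1 + (iv.2.toNat <<< (Bb * iv.1.toNat)), st.2.1,
           st.2.2.1 + (iv.2.toNat <<< (Bb * (n - 1 - iv.1.toNat))), st.2.2.2)
        else
          (st.1, st.2.1 + ((-iv.2).toNat <<< (Bb * iv.1.toNat)),
           st.2.2.1, st.2.2.2 + ((-iv.2).toNat <<< (Bb * (n - 1 - iv.1.toNat)))))
      (0, 0, 0, 0)
      = (Nat.ofDigits (2 ^ Bb) p, Nat.ofDigits (2 ^ Bb) q,
         Nat.ofDigits (2 ^ Bb) p.reverse, Nat.ofDigits (2 ^ Bb) q.reverse) := by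
    simp only [step_split Bb n]
    rw [show (0 : Int) = ((0 : Nat) : Int) from rfl, foldl_quad]
    rw [sum_enum_pow Bb pospart s 0, sum_enum_pow Bb negpart s 0,
      sum_enum_pow_rev Bb (n - 1) pospart s 0 (by omega),
      sum_enum_pow_rev Bb (n - 1) negpart s 0 (by omega)]
    simp [hp, hq]
  rw [hfold]
  -- now each masked shift is a digit of one of the four products
  have hdigit : ∀ (X Y : List Nat), (∀ u ∈ X, u ≤ Mn) → (∀ u ∈ Y, u ≤ Mn) → X.length = n →
      ∀ (m : Nat),
      (Nat.ofDigits (2 ^ Bb) X * Nat.ofDigits (2 ^ Bb) Y) >>> (Bb * m) &&& ((1 <<< Bb) - 1)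
        = (conv X Y).getD m 0 := by
    intro X Y hX hY hlen m
    rw [← ofDigits_conv, Nat.shiftLeft_eq, one_mul, Nat.and_two_pow_sub_one_eq_mod,
      Nat.shiftRight_eq_div_pow, pow_mul]
    apply ofDigits_extract
    intro d hd
    have := mem_conv_le X Y hX hY d hd
    rw [hlen] at this
    omega
  have hplen : p.length = n := by rw [hp, hn]; simp
  have hqlen : q.length = n := by rw [hq, hn]; simp
  -- every lag value equals corrB
  apply congrArg (fun l => (PySem.List.max? l (fun y => y)).getD 0)
  apply List.map_congr_left
  intro k hk
  have hkr := PySem.List.mem_pyRange_one.mp hk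
  set kn := k.toNat with hkn
  have hk1 : 1 ≤ kn := by omega
  have hk2 : kn < n := by omega
  rw [hdigit p p.reverse hpb hprb hplen, hdigit p q.reverse hpb hqrb hplen,
    hdigit q p.reverse hqb hprb hqlen, hdigit q q.reverse hqb hqrb hqlen]
  have hck : (k : Int) = ((kn : Nat) : Int) := by omega
  rw [hck]
  rw [← signed_digit s kn n hn hk1 hk2]
  -- expand the four convolution digits and recombine the signed parts
  set m := n - 1 + kn with hm
  rw [getD_conv p p.reverse m, getD_conv p q.reverse m, getD_conv q p.reverse m,
    getD_conv q q.reverse m]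
  push_cast
  rw [← Finset.sum_sub_distrib, ← Finset.sum_sub_distrib, ← Finset.sum_add_distrib]
  apply Finset.sum_congr rfl
  intro i _
  have hrev1 : p.reverse = s.reverse.map pospart := by rw [hp, List.map_reverse]
  have hrev2 : q.reverse = s.reverse.map negpart := by rw [hq, List.map_reverse]
  have e1 := part_cancel s i
  have e2 := part_cancel s.reverse (m - i)
  rw [hrev1, hrev2]
  calc ((s.map pospart).getD i 0 : Int) * ((s.reverse.map pospart).getD (m - i) 0 : Int)
        - (s.map pospart).getD i 0 * (s.reverse.map negpart).getD (m - i) 0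
        - (s.map negpart).getD i 0 * (s.reverse.map pospart).getD (m - i) 0
        + (s.map negpart).getD i 0 * (s.reverse.map negpart).getD (m - i) 0
      = (((s.map pospart).getD i 0 : Int) - (s.map negpart).getD i 0)
        * (((s.reverse.map pospart).getD (m - i) 0 : Int) - (s.reverse.map negpart).getD (m - i) 0) := by ring
    _ = s.getD i 0 * s.reverse.getD (m - i) 0 := by rw [e1, e2]

-- ===== VERDICT =====
theorem getPsl_spec : Claim_equal_getPsl := by
  intro individual _ hPre
  unfold Spec_getPsl
  rw [getPsl_eq_corrmax individual hPre, ← getPsl_alt_eq_corrmax individual hPre]
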